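-- pv_equiv track=rewrite | github.com/Leapense/problems | 10166번: 관중석/solution.py | count_visible_seats
-- ===== SOURCE A (Python) =====
-- from typing import List
--
-- def totients_upto(n: int) -> List[int]:
--     phi = list(range(n + 1))
--     for p in range(2, n + 1):
--         if phi[p] == p:
--             for multiple in range(p, n + 1, p):
--                 phi[multiple] -= phi[multiple] // p
--
--     return phi
--
-- def count_visible_seats(d1: int, d2: int) -> int:
--     phi = totients_upto(d2)
--     visible = 0
--     for d in range(1, d2 + 1):
--         first = (d1 + d - 1) // d
--         last = d2 // d
--         if first <= last:
--             visible += phi[d]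
--
--     return visible
-- ===== SOURCE B (Python) =====
-- from typing import List
--
-- def totients_upto(n: int) -> List[int]:
--     phi = list(range(n + 1))
--     for p in range(2, n + 1):
--         if phi[p] == p:
--             for multiple in range(p, n + 1, p):
--                 phi[multiple] -= phi[multiple] // p
--
--     return phi
--
-- def count_visible_seats(d1: int, d2: int) -> int:
--     # Same totient sieve, but the summation is done per quotient block of
--     # d2 // d with prefix sums: O(sqrt(d2)) block steps instead of one
--     # condition test per d.
--     phi = totients_upto(d2)
--     pre = [0]
--     s = 0
--     for x in phi[1:]:
--         s += x
--         pre.append(s)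
--     visible = 0
--     d = 1
--     while d <= d2:
--         q = d2 // d
--         hi = d2 // q
--         lo = -(-d1 // q)
--         if lo < d:
--             lo = d
--         if lo <= hi:
--             visible += pre[hi] - pre[lo - 1]
--         d = hi + 1
--     return visible
-- ===== Notes on version B (the rewrite author's own statement) =====
-- stated objective: alternative
-- what changed: The per-d summation loop (one ceil/floor test for every d in 1..d2) is replaced by quotient-block enumeration over constant values of d2//d with prefix sums of the totient array, so the summation takes O(sqrt(d2)) block steps instead of d2 tests; the totient sieve is kept.
import Mathlib
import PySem

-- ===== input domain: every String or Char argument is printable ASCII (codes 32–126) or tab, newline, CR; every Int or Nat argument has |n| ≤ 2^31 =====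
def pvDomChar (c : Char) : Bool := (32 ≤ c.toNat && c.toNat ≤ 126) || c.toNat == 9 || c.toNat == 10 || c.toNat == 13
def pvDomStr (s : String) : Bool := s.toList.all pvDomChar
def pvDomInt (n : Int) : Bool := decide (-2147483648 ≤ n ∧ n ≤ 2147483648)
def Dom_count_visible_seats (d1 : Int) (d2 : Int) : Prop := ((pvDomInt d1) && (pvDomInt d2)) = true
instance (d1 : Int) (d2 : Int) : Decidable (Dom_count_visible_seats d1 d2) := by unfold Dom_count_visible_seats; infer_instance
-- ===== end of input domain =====

-- B keeps A's totient sieve but replaces the per-d summation loop by quotient-block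
-- enumeration over constant d2 // d with prefix sums of the totient array (alternative algorithm).


-- ===== PORT A =====
-- Python's list is an O(1)-indexed mutable array, so `phi` is an `Array Int`.
-- Every index used below is in range (2 ≤ p ≤ n, p ≤ m ≤ n, phi.size = n+1), so
-- `getD _ 0` / `setIfInBounds` are exactly Python's `phi[p]` / `phi[m] = …` here.
-- phi = list(range(n+1)); for p in range(2,n+1): if phi[p]==p: for m in range(p,n+1,p): phi[m] -= phi[m]//p
def totients_upto (n : Int) : Array Int :=
  let phi0 := (Array.range (n + 1).toNat).map (fun k : Nat => (k : Int))
  (PySem.List.pyRange 2 (n + 1) 1).foldl (fun phi p =>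
    if phi.getD p.toNat 0 == p then
      (PySem.List.pyRange p (n + 1) p).foldl (fun phi m =>
        phi.setIfInBounds m.toNat
          (phi.getD m.toNat 0 - PySem.Int.floordiv (phi.getD m.toNat 0) p)) phi
    else phi) phi0

-- phi[d] with 1 ≤ d ≤ d2 < phi.size: `getD d.toNat 0` is exactly Python's phi[d]
def count_visible_seats (d1 : Int) (d2 : Int) : Int :=
  let phi := totients_upto d2
  (PySem.List.pyRange 1 (d2 + 1) 1).foldl (fun visible d =>
    let first := PySem.Int.floordiv (d1 + d - 1) d
    let last := PySem.Int.floordiv d2 d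
    if first ≤ last then visible + phi.getD d.toNat 0 else visible) 0

-- ===== PORT B =====
-- B's sieve is the same code as A's (Source B keeps totients_upto verbatim)
def totients_upto_alt (n : Int) : Array Int :=
  let phi0 := (Array.range (n + 1).toNat).map (fun k : Nat => (k : Int))
  (PySem.List.pyRange 2 (n + 1) 1).foldl (fun phi p =>
    if phi.getD p.toNat 0 == p then
      (PySem.List.pyRange p (n + 1) p).foldl (fun phi m =>
        phi.setIfInBounds m.toNat
          (phi.getD m.toNat 0 - PySem.Int.floordiv (phi.getD m.toNat 0) p)) phi
    else phi) phi0

-- the running-sum append loop of Source B ('s += x; pre.append(s)'): pre is an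
-- appended-to Python list, i.e. an Array built by push
def preBuild (s : Int) (pre : Array Int) : List Int → Array Int
  | [] => pre
  | x :: xs => preBuild (s + x) (pre.push (s + x)) xs

-- the while loop of Source B; `fuel` only makes the recursion structural (the loop runs at
-- most d2 iterations, d strictly increases), every step is Source B's loop body verbatim.
-- pre[hi] and pre[lo-1] have 0 ≤ lo-1 ≤ hi < pre.size whenever read, so `getD _ 0`
-- is exactly Python's indexing here.
def blockLoop (d1 n : Int) (pre : Array Int) : Nat → Int → Int → Int
  | 0, _, visible => visible
  | fuel + 1, d, visible =>
    if d ≤ n then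
      let q := PySem.Int.floordiv n d
      let hi := PySem.Int.floordiv n q
      let lo0 := -(PySem.Int.floordiv (-d1) q)
      let lo := if lo0 < d then d else lo0
      let visible' :=
        if lo ≤ hi then
          visible + (pre.getD hi.toNat 0 - pre.getD (lo - 1).toNat 0)
        else visible
      blockLoop d1 n pre fuel (hi + 1) visible'
    else visible

def count_visible_seats_alt (d1 : Int) (d2 : Int) : Int :=
  let phi := totients_upto_alt d2
  let pre := preBuild 0 #[0] (PySem.List.slice phi.toList (some 1) none)
  blockLoop d1 d2 pre (d2 + 1).toNat 1 0

-- ===== PRECONDITION & SPEC =====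
def Spec_count_visible_seats (d1 : Int) (d2 : Int) (out : Int) : Prop := out = count_visible_seats_alt d1 d2
instance (d1 : Int) (d2 : Int) (out : Int) : Decidable (Spec_count_visible_seats d1 d2 out) := by unfold Spec_count_visible_seats; infer_instance

-- ===== CLAIM (what is proved, stated in full; the proofs are below) =====
def Claim_equal_count_visible_seats : Prop := ∀ (d1 : Int) (d2 : Int), Dom_count_visible_seats d1 d2 → Spec_count_visible_seats d1 d2 (count_visible_seats d1 d2)

-- ===== LEMMAS AND PROOFS =====

-- A's conditional sum, written over the materialised array (as a list)
def pvT (d1 n : Int) (xs : List Int) (lo : Int) : Int :=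
  ((PySem.List.pyRange lo (n + 1) 1).map
    (fun d => if PySem.Int.floordiv (d1 + d - 1) d ≤ PySem.Int.floordiv n d
      then PySem.List.pyGetD xs d 0 else 0)).sum

-- proof-side, non-accumulator form of preBuild
def pvScan : Int → List Int → List Int
  | _, [] => []
  | s, x :: xs => (s + x) :: pvScan (s + x) xs

-- Array.getD is List.getD on toList
lemma pv_arr_getD (a : Array Int) (i : Nat) : a.getD i 0 = a.toList.getD i 0 := by
  unfold Array.getD
  split
  · rename_i h
    rw [List.getD_eq_getElem _ _ (by simpa using h)]
    simp
  · rename_i h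
    rw [List.getD_eq_default _ _ (by simpa using Nat.le_of_not_lt h)]

-- getD with a nonnegative Int index is PySem's pyGetD
lemma pv_arr_read (a : Array Int) (i : Int) (h : 0 ≤ i) :
    a.getD i.toNat 0 = PySem.List.pyGetD a.toList i 0 := by
  rw [pv_arr_getD, PySem.List.pyGetD_of_nonneg _ _ h]

-- a fold that conditionally adds is an accumulating sum (glue for A's loop shape)
lemma pv_foldl_ite (c : Int → Prop) [DecidablePred c] (g : Int → Int) :
    ∀ (l : List Int) (a : Int),
      l.foldl (fun v d => if c d then v + g d else v) a
        = a + (l.map (fun d => if c d then g d else 0)).sum := by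
  intro l
  induction l with
  | nil => intro a; simp
  | cons x xs ih =>
      intro a
      rw [List.foldl_cons, ih]
      by_cases h : c x
      · simp only [if_pos h, List.map_cons, List.sum_cons]; ring
      · simp only [if_neg h, List.map_cons, List.sum_cons]; ring

-- A's loop is an accumulating fold over the totient array
lemma pvA_eq_T (d1 d2 : Int) : count_visible_seats d1 d2 = pvT d1 d2 (totients_upto d2).toList 1 := by
  unfold count_visible_seats
  refine (pv_foldl_ite (fun d => PySem.Int.floordiv (d1 + d - 1) d ≤ PySem.Int.floordiv d2 d)
      (fun d => (totients_upto d2).getD d.toNat 0)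
      (PySem.List.pyRange 1 (d2 + 1) 1) 0).trans ?_
  rw [zero_add]
  unfold pvT
  apply congrArg List.sum
  apply List.map_congr_left
  intro x hx
  rw [PySem.List.mem_pyRange_one] at hx
  rw [pv_arr_read _ _ (by omega)]

lemma pv_foldl_size {β : Type} (g : Array Int → β → Array Int)
    (h : ∀ s x, (g s x).size = s.size) :
    ∀ (l : List β) (acc : Array Int), (l.foldl g acc).size = acc.size := by
  intro l
  induction l with
  | nil => intro acc; rfl
  | cons x xs ih => intro acc; rw [List.foldl_cons, ih, h]

lemma pv_tot_len (n : Int) : (totients_upto n).size = (n + 1).toNat := by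
  unfold totients_upto
  rw [pv_foldl_size]
  · simp
  · intro s x
    split
    · rw [pv_foldl_size]
      intro s' m; exact Array.size_setIfInBounds
    · rfl

lemma pv_preBuild_toList : ∀ (l : List Int) (s : Int) (acc : Array Int),
    (preBuild s acc l).toList = acc.toList ++ pvScan s l := by
  intro l
  induction l with
  | nil => intro s acc; simp [preBuild, pvScan]
  | cons x xs ih =>
      intro s acc
      rw [preBuild, ih, pvScan]
      simp

lemma pvScan_getElem? (l : List Int) : ∀ (s : Int) (i : Nat), i < l.length →
    (pvScan s l)[i]? = some (s + (l.take (i + 1)).sum) := by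
  induction l with
  | nil => intro s i h; simp at h
  | cons x xs ih =>
      intro s i h
      cases i with
      | zero => simp [pvScan]
      | succ j =>
          simp only [pvScan, List.getElem?_cons_succ]
          rw [ih (s + x) j (by simpa using h)]
          simp [add_assoc]

lemma pvPre_getD_nat (l : List Int) (i : Nat) (h : i ≤ l.length) :
    (preBuild 0 #[0] l).getD i 0 = (l.take i).sum := by
  rw [pv_arr_getD, pv_preBuild_toList]
  cases i with
  | zero => simp
  | succ j =>
      have hj : j < l.length := by omega
      simp only [List.getD, List.cons_append, List.nil_append, List.getElem?_cons_succ]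
      rw [pvScan_getElem? l 0 j hj]
      simp

-- sum over range 1..k of phi-lookups is a take-sum of the tail
lemma pv_seg (xs : List Int) : ∀ (k : Nat), k ≤ xs.tail.length →
    ((PySem.List.pyRange 1 ((k : Int) + 1) 1).map (fun d => PySem.List.pyGetD xs d 0)).sum
      = (xs.tail.take k).sum := by
  intro k
  induction k with
  | zero => intro h; rw [PySem.List.pyRange_one_eq_nil (by norm_num)]; simp
  | succ j ih =>
      intro h
      have h1 : ((j + 1 : Nat) : Int) + 1 = ((j : Int) + 1) + 1 := by push_cast; ring
      rw [h1, PySem.List.pyRange_one_succ_right (by omega)]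
      rw [List.map_append, List.sum_append, ih (by omega)]
      have hj : j < xs.tail.length := by omega
      have hget : PySem.List.pyGetD xs ((j : Int) + 1) 0 = xs.tail[j] := by
        have : ((j : Int) + 1) = ((j + 1 : Nat) : Int) := by push_cast; ring
        rw [this, PySem.List.pyGetD_natCast]
        have hlen : j + 1 < xs.length := by
          cases xs with
          | nil => simp at hj
          | cons a as => simp at hj ⊢; omega
        rw [List.getD_eq_getElem _ _ hlen]
        cases xs with
        | nil => simp at hj
        | cons a as => simp
      rw [List.take_add_one]
      have : xs.tail[j]? = some xs.tail[j] := List.getElem?_eq_getElem hj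
      simp [this, hget]

-- ---- floor-division facts for the quotient blocks ----
lemma pv_q_pos {n d : Int} (h1 : 1 ≤ d) (h2 : d ≤ n) : 1 ≤ PySem.Int.floordiv n d := by
  rw [PySem.Int.le_floordiv_iff_mul_le (by omega)]; linarith

lemma pv_mul_le {n d : Int} (hd : 0 < d) : PySem.Int.floordiv n d * d ≤ n :=
  (PySem.Int.le_floordiv_iff_mul_le hd).1 le_rfl

lemma pv_lt_succ_mul {n d : Int} (hd : 0 < d) : n < (PySem.Int.floordiv n d + 1) * d :=
  (PySem.Int.floordiv_lt_iff_lt_mul hd).1 (lt_add_one _)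

lemma pv_hi_ge {n d : Int} (h1 : 1 ≤ d) (h2 : d ≤ n) :
    d ≤ PySem.Int.floordiv n (PySem.Int.floordiv n d) := by
  have hq := pv_q_pos h1 h2
  rw [PySem.Int.le_floordiv_iff_mul_le (by omega)]
  have h := pv_mul_le (n := n) (d := d) (by omega)
  linarith [mul_comm d (PySem.Int.floordiv n d)]

lemma pv_hi_le {n d : Int} (h1 : 1 ≤ d) (h2 : d ≤ n) :
    PySem.Int.floordiv n (PySem.Int.floordiv n d) ≤ n := by
  have hq := pv_q_pos h1 h2
  have h := (PySem.Int.floordiv_lt_iff_lt_mul (show (0:Int) < PySem.Int.floordiv n d by omega)).2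
    (show n < (n + 1) * PySem.Int.floordiv n d by nlinarith)
  linarith

lemma pv_block_const {n d d' : Int} (h1 : 1 ≤ d) (h2 : d ≤ n) (h3 : d ≤ d')
    (h4 : d' ≤ PySem.Int.floordiv n (PySem.Int.floordiv n d)) :
    PySem.Int.floordiv n d' = PySem.Int.floordiv n d := by
  have hq := pv_q_pos h1 h2
  have hd' : (0:Int) < d' := by omega
  have hub := pv_lt_succ_mul (n := n) (d := d) (by omega)
  have hge : PySem.Int.floordiv n d ≤ PySem.Int.floordiv n d' := by
    rw [PySem.Int.le_floordiv_iff_mul_le hd']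
    have h := (PySem.Int.le_floordiv_iff_mul_le (show (0:Int) < PySem.Int.floordiv n d by omega)).1 h4
    linarith [mul_comm d' (PySem.Int.floordiv n d)]
  have hle : PySem.Int.floordiv n d' < PySem.Int.floordiv n d + 1 := by
    rw [PySem.Int.floordiv_lt_iff_lt_mul hd']
    have h : (PySem.Int.floordiv n d + 1) * d ≤ (PySem.Int.floordiv n d + 1) * d' := by nlinarith
    linarith
  omega

-- inside a block with quotient q, A's membership test is `-((-d1) // q) ≤ d'`
lemma pv_cond_iff {d1 n d' : Int} (hd' : 1 ≤ d') (hq1 : 1 ≤ PySem.Int.floordiv n d') :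
    (PySem.Int.floordiv (d1 + d' - 1) d' ≤ PySem.Int.floordiv n d'
      ↔ -(PySem.Int.floordiv (-d1) (PySem.Int.floordiv n d')) ≤ d') := by
  set q := PySem.Int.floordiv n d' with hqdef
  constructor
  · intro h
    have hlt : d1 + d' - 1 < (q + 1) * d' :=
      (PySem.Int.floordiv_lt_iff_lt_mul (by omega : (0:Int) < d')).1 (by omega)
    have hd1 : d1 ≤ q * d' := by nlinarith
    have h2 : -d' ≤ PySem.Int.floordiv (-d1) q := by
      rw [PySem.Int.le_floordiv_iff_mul_le (by omega)]
      nlinarith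
    linarith
  · intro h
    have h' : -d' ≤ PySem.Int.floordiv (-d1) q := by linarith
    have h2 : -d' * q ≤ -d1 := (PySem.Int.le_floordiv_iff_mul_le (by omega)).1 h'
    have hd1 : d1 ≤ q * d' := by nlinarith
    have h3 : PySem.Int.floordiv (d1 + d' - 1) d' < q + 1 := by
      rw [PySem.Int.floordiv_lt_iff_lt_mul (by omega : (0:Int) < d')]
      nlinarith
    linarith

-- ---- sum plumbing ----
lemma pv_sum_split (f : Int → Int) (a m b : Int) (h1 : a ≤ m) (h2 : m ≤ b) :
    ((PySem.List.pyRange a b 1).map f).sum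
      = ((PySem.List.pyRange a m 1).map f).sum + ((PySem.List.pyRange m b 1).map f).sum := by
  rw [PySem.List.pyRange_one_append a m b h1 h2, List.map_append, List.sum_append]

lemma pv_sum_zero (f : Int → Int) (l : List Int) (h : ∀ x ∈ l, f x = 0) : (l.map f).sum = 0 := by
  rw [List.map_congr_left h]; simp

lemma pv_pre_getD (l : List Int) (i : Int) (h0 : 0 ≤ i) (h : i ≤ (l.length : Int)) :
    (preBuild 0 #[0] l).getD i.toNat 0 = (l.take i.toNat).sum := by
  obtain ⟨k, rfl⟩ : ∃ k : Nat, i = (k : Int) := ⟨i.toNat, (Int.toNat_of_nonneg h0).symm⟩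
  rw [Int.toNat_natCast, pvPre_getD_nat _ _ (by omega)]

lemma pv_seg_int (xs : List Int) (i : Int) (h0 : 0 ≤ i) (h : i ≤ (xs.tail.length : Int)) :
    ((PySem.List.pyRange 1 (i + 1) 1).map (fun d => PySem.List.pyGetD xs d 0)).sum
      = (xs.tail.take i.toNat).sum := by
  obtain ⟨k, rfl⟩ : ∃ k : Nat, i = (k : Int) := ⟨i.toNat, (Int.toNat_of_nonneg h0).symm⟩
  rw [pv_seg xs k (by omega)]
  simp

-- the while loop of B computes, block by block, the same conditional sum as A's loop
lemma pv_loop_eq (d1 n : Int) (phi : Array Int) (hlen : phi.size = (n + 1).toNat) :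
    ∀ (fuel : Nat) (d v : Int), 1 ≤ d → (n + 1 - d).toNat ≤ fuel →
      blockLoop d1 n (preBuild 0 #[0] phi.toList.tail) fuel d v = v + pvT d1 n phi.toList d := by
  intro fuel
  induction fuel with
  | zero =>
      intro d v h1 h2
      simp [blockLoop, pvT, PySem.List.pyRange_one_eq_nil (by omega : n + 1 ≤ d)]
  | succ fuel ih =>
      intro d v h1 h2
      by_cases hdn : d ≤ n
      · have hq := pv_q_pos h1 hdn
        have hhige := pv_hi_ge h1 hdn
        have hhile := pv_hi_le h1 hdn
        simp only [blockLoop, if_pos hdn]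
        set q := PySem.Int.floordiv n d with hqdef
        set hi := PySem.Int.floordiv n q with hhidef
        set lo0 := -(PySem.Int.floordiv (-d1) q) with hlo0def
        set lo : Int := if lo0 < d then d else lo0 with hlodef
        have hlod : d ≤ lo := by rw [hlodef]; split <;> omega
        have hlolo0 : lo0 ≤ lo := by rw [hlodef]; split <;> omega
        rw [ih (hi + 1) _ (by omega) (by omega)]
        have hsplit : pvT d1 n phi.toList d
            = ((PySem.List.pyRange d (hi + 1) 1).map
                (fun x => if PySem.Int.floordiv (d1 + x - 1) x ≤ PySem.Int.floordiv n x
                  then PySem.List.pyGetD phi.toList x 0 else 0)).sum + pvT d1 n phi.toList (hi + 1) := by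
          unfold pvT
          exact pv_sum_split _ d (hi + 1) (n + 1) (by omega) (by omega)
        have hcongr : ∀ x ∈ PySem.List.pyRange d (hi + 1) 1,
            (if PySem.Int.floordiv (d1 + x - 1) x ≤ PySem.Int.floordiv n x
              then PySem.List.pyGetD phi.toList x 0 else 0)
            = (if lo0 ≤ x then PySem.List.pyGetD phi.toList x 0 else 0) := by
          intro x hx
          rw [PySem.List.mem_pyRange_one] at hx
          have hfd : PySem.Int.floordiv n x = q := pv_block_const h1 hdn hx.1
            (by rw [← hqdef, ← hhidef]; omega)
          have hiff := pv_cond_iff (d1 := d1) (n := n) (d' := x) (by omega) (by omega)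
          rw [hfd] at hiff
          rw [hfd, if_congr hiff rfl rfl]
        have htail : (phi.toList.tail.length : Int) = n := by
          have h1n : 1 ≤ n := by omega
          simp [List.length_tail, hlen]
          omega
        have hblock :
            (if lo ≤ hi then
              v + ((preBuild 0 #[0] phi.toList.tail).getD hi.toNat 0
                - (preBuild 0 #[0] phi.toList.tail).getD (lo - 1).toNat 0)
            else v)
            = v + ((PySem.List.pyRange d (hi + 1) 1).map
                (fun x => if PySem.Int.floordiv (d1 + x - 1) x ≤ PySem.Int.floordiv n x
                  then PySem.List.pyGetD phi.toList x 0 else 0)).sum := by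
          rw [List.map_congr_left hcongr]
          by_cases hlh : lo ≤ hi
          · rw [if_pos hlh]
            rw [pv_sum_split _ d lo (hi + 1) hlod (by omega)]
            have h0 : ((PySem.List.pyRange d lo 1).map
                (fun x => if lo0 ≤ x then PySem.List.pyGetD phi.toList x 0 else 0)).sum = 0 := by
              apply pv_sum_zero
              intro x hx
              rw [PySem.List.mem_pyRange_one] at hx
              have hxlt : x < lo0 := by
                rcases hx with ⟨hxa, hxb⟩
                rw [hlodef] at hxb
                split at hxb <;> omega
              rw [if_neg (by omega)]
            rw [h0, zero_add]
            have hphi : ((PySem.List.pyRange lo (hi + 1) 1).map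
                (fun x => if lo0 ≤ x then PySem.List.pyGetD phi.toList x 0 else 0)).sum
                = ((PySem.List.pyRange lo (hi + 1) 1).map
                    (fun x => PySem.List.pyGetD phi.toList x 0)).sum := by
              apply congrArg List.sum
              apply List.map_congr_left
              intro x hx
              rw [PySem.List.mem_pyRange_one] at hx
              rw [if_pos (by omega)]
            rw [hphi]
            have hPhi_hi := pv_seg_int phi.toList hi (by omega) (by rw [htail]; omega)
            have hs1 := pv_sum_split (fun x => PySem.List.pyGetD phi.toList x 0) 1 lo (hi + 1)
              (by omega) (by omega)
            have hlo_eq : ((PySem.List.pyRange 1 lo 1).map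
                (fun x => PySem.List.pyGetD phi.toList x 0)).sum
                = (phi.toList.tail.take (lo - 1).toNat).sum := by
              have h := pv_seg_int phi.toList (lo - 1) (by omega) (by rw [htail]; omega)
              rw [show (lo - 1) + 1 = lo by ring] at h
              exact h
            rw [pv_pre_getD phi.toList.tail hi (by omega) (by rw [htail]; omega),
                pv_pre_getD phi.toList.tail (lo - 1) (by omega) (by rw [htail]; omega)]
            rw [hPhi_hi] at hs1
            rw [hlo_eq] at hs1
            linarith
          · rw [if_neg hlh]
            have h0 : ((PySem.List.pyRange d (hi + 1) 1).map
                (fun x => if lo0 ≤ x then PySem.List.pyGetD phi.toList x 0 else 0)).sum = 0 := by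
              apply pv_sum_zero
              intro x hx
              rw [PySem.List.mem_pyRange_one] at hx
              have hxlt : x < lo0 := by
                rw [hlodef] at hlh
                split at hlh <;> omega
              rw [if_neg (by omega)]
            rw [h0, add_zero]
        rw [hsplit, ← add_assoc, hblock]
      · simp only [blockLoop, if_neg hdn]
        have h0 : pvT d1 n phi.toList d = 0 := by
          simp [pvT, PySem.List.pyRange_one_eq_nil (by omega : n + 1 ≤ d)]
        rw [h0, add_zero]

lemma pv_alt_eq (d1 d2 : Int) :
    count_visible_seats_alt d1 d2 = pvT d1 d2 (totients_upto d2).toList 1 := by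
  have halt : totients_upto_alt d2 = totients_upto d2 := rfl
  show blockLoop d1 d2
      (preBuild 0 #[0] (PySem.List.slice (totients_upto_alt d2).toList (some 1) none))
      (d2 + 1).toNat 1 0 = pvT d1 d2 (totients_upto d2).toList 1
  rw [halt, PySem.List.slice_from_one]
  rw [pv_loop_eq d1 d2 (totients_upto d2) (pv_tot_len d2) (d2 + 1).toNat 1 0 le_rfl (by omega)]
  rw [zero_add]

-- ===== VERDICT (by name: the statement is the Claim_ definition above) =====
theorem count_visible_seats_spec : Claim_equal_count_visible_seats := by
  intro d1 d2 _
  unfold Spec_count_visible_seats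
  rw [pvA_eq_T, pv_alt_eq]
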